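-- pv_equiv track=rewrite | github.com/Samit-Maharjan/Advent-Of-Code | Year 2023/Day 13/Day13S.py | solve
-- ===== SOURCE A (Python) =====
-- def check(line, idx, length):
--     l, r = idx, idx + 1
--     while l >= 0 and r < length:
--         if line[l] != line[r]:
--             break
--         l, r = l - 1, r + 1
--     return (l < 0 or r == length)
--
-- def solve(pattern):
--     m, n = len(pattern), len(pattern[0])
--     h_m = [set() for _ in range(m)]
--     for i, x in enumerate(pattern):
--         for j in range(n):
--             if check(x, j, n):
--                 h_m[i].add(j)
--     v_m = [set() for _ in range(n)]
--     T = list(zip(*pattern) )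
--     for i, x in enumerate(T):
--         for j in range(m):
--             if check(x, j, m):
--                 v_m[i].add(j)
--     mx, my = {*range(n - 1)}, {*range(m - 1)}
--     for x in h_m:
--         mx = mx.intersection(x)
--     for x in v_m:
--         my = my.intersection(x)
--     return mx, my
-- ===== SOURCE B (Python) =====
-- def solve(pattern):
--     n = len(pattern[0])
--     rows = [row[:n] for row in pattern]
--     m = len(rows)
--     cols = ["".join(c) for c in zip(*rows)]
--
--     def ok(line, j):
--         a = line[:j + 1][::-1]
--         b = line[j + 1:]
--         return a.startswith(b) or b.startswith(a)
--
--     mx = {j for j in range(n - 1) if all(ok(r, j) for r in rows)}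
--     my = {j for j in range(m - 1) if all(ok(c, j) for c in cols)}
--     return mx, my
-- ===== Notes on version B (the rewrite author's own statement) =====
-- stated objective: simpler
-- what changed: B replaces A's per-cell two-pointer boundary walk into per-line sets folded by set intersection with a direct per-split test (reversed prefix vs suffix compared with startswith) combined over all lines by a short-circuiting all(), building columns with zip instead of indexing preallocated sets.
-- outside the precondition, e.g. on solve(['a', '']): A returns (set(), set()), B returns (set(), {0})
import Mathlib
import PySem

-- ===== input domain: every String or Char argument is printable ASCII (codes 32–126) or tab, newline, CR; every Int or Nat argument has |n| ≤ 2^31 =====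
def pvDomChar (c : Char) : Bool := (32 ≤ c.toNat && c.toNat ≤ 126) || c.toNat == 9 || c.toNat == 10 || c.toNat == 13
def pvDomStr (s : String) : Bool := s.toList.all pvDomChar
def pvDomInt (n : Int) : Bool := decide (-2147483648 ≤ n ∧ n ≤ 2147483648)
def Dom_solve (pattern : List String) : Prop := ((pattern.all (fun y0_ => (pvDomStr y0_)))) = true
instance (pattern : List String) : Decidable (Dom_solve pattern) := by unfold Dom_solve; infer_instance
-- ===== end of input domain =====

-- B tests each split position directly with a reversed-prefix/suffix prefix comparison combined over all lines
-- with `all`, instead of A's per-cell two-pointer boundary walk into per-line sets folded by intersection (objective: simpler).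

-- ===== PORT A =====
-- the while-loop of `check`: (l, r) move outward until a mismatch or a boundary is reached
def checkLoop (cs : List Char) (len : Int) (l r : Int) : Int × Int :=
  if h : 0 ≤ l ∧ r < len then
    if PySem.List.pyGet? cs l ≠ PySem.List.pyGet? cs r then (l, r)
    else checkLoop cs len (l - 1) (r + 1)
  else (l, r)
termination_by (len - r).toNat
decreasing_by omega

def check (cs : List Char) (idx length : Int) : Bool :=
  let p := checkLoop cs length idx (idx + 1)
  decide (p.1 < 0 ∨ p.2 = length)

def solve (pattern : List String) : List Int × List Int :=
  let m : Int := pattern.length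
  let n : Int := ((pattern.headD "").toList.length : Int)   -- pattern[0]; IndexError on [] is excluded by Pre_
  let rows : List (List Char) := pattern.map String.toList
  let h_m : List (List Int) :=
    rows.map (fun x => (PySem.List.pyRange 0 n 1).filter (fun j => check x j n))
  -- T = list(zip(*pattern)): columns up to the minimum row length
  let minLen : Nat := rows.foldl (fun a r => Nat.min a r.length) (pattern.headD "").toList.length
  let T : List (List Char) := (List.range minLen).map (fun i => rows.map (fun row => row.getD i ' '))
  let v_m : List (List Int) :=
    T.map (fun x => (PySem.List.pyRange 0 m 1).filter (fun j => check x j m))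
  let mx := h_m.foldl (fun acc s => acc.filter (fun j => s.contains j)) (PySem.List.pyRange 0 (n - 1) 1)
  let my := v_m.foldl (fun acc s => acc.filter (fun j => s.contains j)) (PySem.List.pyRange 0 (m - 1) 1)
  (mx, my)

-- ===== PORT B =====
def okSplit (cs : List Char) (j : Nat) : Bool :=
  let a := (cs.take (j + 1)).reverse
  let b := cs.drop (j + 1)
  a.isPrefixOf b || b.isPrefixOf a

def solve_alt (pattern : List String) : List Int × List Int :=
  let n : Nat := (pattern.headD "").toList.length
  let rows : List (List Char) := pattern.map (fun s => s.toList.take n)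
  let m : Nat := rows.length
  -- cols = ["".join(c) for c in zip(*rows)]
  let k : Nat := rows.foldl (fun a r => Nat.min a r.length) n
  let cols : List (List Char) := (List.range k).map (fun i => rows.map (fun r => r.getD i ' '))
  let mx := ((List.range (n - 1)).filter (fun j => rows.all (fun r => okSplit r j))).map (fun j : Nat => (j : Int))
  let my := ((List.range (m - 1)).filter (fun j => cols.all (fun c => okSplit c j))).map (fun j : Nat => (j : Int))
  (mx, my)

-- ===== PRECONDITION & SPEC =====
-- Pre_ excludes the empty list (A raises IndexError) and ragged patterns with a row shorter than the first
-- row: A raises IndexError on those too, except in the degenerate case of a length-1 first row with an empty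
-- later row, where A's returned (∅, ∅) is an artefact of preallocated never-filled column sets.
def Pre_solve (pattern : List String) : Prop :=
  pattern ≠ [] ∧ ∀ s ∈ pattern, (pattern.headD "").toList.length ≤ s.toList.length
instance (pattern : List String) : Decidable (Pre_solve pattern) := by unfold Pre_solve; infer_instance

def pvWitness_solve : List String := ["#.#", "#.#", "..#"]

def Spec_solve (pattern : List String) (out : List Int × List Int) : Prop := out = solve_alt pattern
instance (pattern : List String) (out : List Int × List Int) : Decidable (Spec_solve pattern out) := by unfold Spec_solve; infer_instance

-- ===== CLAIM (what is proved, stated in full; the proofs are below) =====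
def Claim_equal_solve : Prop := ∀ (pattern : List String), Dom_solve pattern → Pre_solve pattern → Spec_solve pattern (solve pattern)

-- ===== LEMMAS AND PROOFS =====

-- pairwise equality of the overlapping parts of two lists
def pmatch : List Char → List Char → Bool
  | x :: xs, y :: ys => x == y && pmatch xs ys
  | _, _ => true

lemma pmatch_nil_right (a : List Char) : pmatch a [] = true := by cases a <;> rfl

lemma prefix_or_eq_pmatch (a b : List Char) : (a.isPrefixOf b || b.isPrefixOf a) = pmatch a b := by
  induction a generalizing b with
  | nil => cases b <;> simp [pmatch, List.isPrefixOf]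
  | cons x xs ih =>
    cases b with
    | nil => simp [pmatch, List.isPrefixOf]
    | cons y ys =>
      by_cases hxy : x = y
      · subst hxy
        simp [pmatch, List.isPrefixOf, ih]
      · have h1 : (x == y) = false := by simp [hxy]
        have h2 : (y == x) = false := by simp [Ne.symm hxy]
        simp [pmatch, List.isPrefixOf, h1, h2]

lemma checkLoop_spec (cs : List Char) (nn : Nat) (hn : nn ≤ cs.length) :
    ∀ (l r : Int), l < r → 0 ≤ r → r ≤ (nn : Int) →
    (decide ((checkLoop cs (nn : Int) l r).1 < 0 ∨ (checkLoop cs (nn : Int) l r).2 = (nn : Int)))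
      = pmatch ((cs.take nn).take (l + 1).toNat).reverse ((cs.take nn).drop r.toNat) := by
  intro l r
  induction l, r using checkLoop.induct cs ((nn : Int)) with
  | case1 l r h hne =>
    intro hlr hr0 hrn
    rw [checkLoop, dif_pos h, if_pos hne]
    have hl0 : 0 ≤ l := h.1
    have hrl : r < (nn:Int) := h.2
    have hlt : l.toNat < nn := by omega
    have hrt : r.toNat < nn := by omega
    have hlen : (cs.take nn).length = nn := by rw [List.length_take]; omega
    have e1 : ((cs.take nn).take (l+1).toNat).reverse
        = (cs.take nn)[l.toNat] :: ((cs.take nn).take l.toNat).reverse := by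
      have : (l+1).toNat = l.toNat + 1 := by omega
      rw [this, List.take_succ_eq_append_getElem (by omega)]
      simp
    have e2 : (cs.take nn).drop r.toNat = (cs.take nn)[r.toNat] :: (cs.take nn).drop (r.toNat+1) :=
      List.drop_eq_getElem_cons (by omega)
    rw [e1, e2]
    have hga : PySem.List.pyGet? cs l = some (cs[l.toNat]) :=
      PySem.List.pyGet?_eq_some_getElem cs hl0 (by omega)
    have hgb : PySem.List.pyGet? cs r = some (cs[r.toNat]) :=
      PySem.List.pyGet?_eq_some_getElem cs hr0 (by omega)
    have hne' : cs[l.toNat] ≠ cs[r.toNat] := by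
      intro hcon; exact hne (by rw [hga, hgb, hcon])
    have hbeq : ((cs.take nn)[l.toNat] == (cs.take nn)[r.toNat]) = false := by
      simp [List.getElem_take, hne']
    have hpm : pmatch ((cs.take nn)[l.toNat] :: ((cs.take nn).take l.toNat).reverse)
        ((cs.take nn)[r.toNat] :: (cs.take nn).drop (r.toNat + 1)) = false := by
      simp only [pmatch, hbeq, Bool.false_and]
    rw [hpm]
    simp only [decide_eq_false_iff_not, not_or]
    refine ⟨by omega, by omega⟩
  | case2 l r h hne ih =>
    intro hlr hr0 hrn
    rw [checkLoop, dif_pos h, if_neg hne]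
    have hl0 : 0 ≤ l := h.1
    have hrl : r < (nn:Int) := h.2
    have heq : PySem.List.pyGet? cs l = PySem.List.pyGet? cs r := by
      by_contra hc; exact hne hc
    rw [ih (by omega) (by omega) (by omega)]
    have hlt : l.toNat < nn := by omega
    have hrt : r.toNat < nn := by omega
    have hlen : (cs.take nn).length = nn := by rw [List.length_take]; omega
    have e1 : ((cs.take nn).take (l+1).toNat).reverse
        = (cs.take nn)[l.toNat] :: ((cs.take nn).take l.toNat).reverse := by
      have : (l+1).toNat = l.toNat + 1 := by omega
      rw [this, List.take_succ_eq_append_getElem (by rw [List.length_take]; omega)]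
      simp
    have e2 : (cs.take nn).drop r.toNat = (cs.take nn)[r.toNat] :: (cs.take nn).drop (r.toNat+1) :=
      List.drop_eq_getElem_cons (by rw [List.length_take]; omega)
    rw [e1, e2]
    have hga : PySem.List.pyGet? cs l = some (cs[l.toNat]) :=
      PySem.List.pyGet?_eq_some_getElem cs hl0 (by omega)
    have hgb : PySem.List.pyGet? cs r = some (cs[r.toNat]) :=
      PySem.List.pyGet?_eq_some_getElem cs hr0 (by omega)
    have heq' : cs[l.toNat] = cs[r.toNat] := by
      have h' := heq; rw [hga, hgb] at h'; exact Option.some.inj h'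
    have e3 : ((l - 1) + 1).toNat = l.toNat := by omega
    have e4 : (r + 1).toNat = r.toNat + 1 := by omega
    rw [e3, e4]
    simp [pmatch, List.getElem_take, heq']
  | case3 l r h =>
    intro hlr hr0 hrn
    rw [checkLoop, dif_neg h]
    rcases not_and_or.mp h with hl | hr
    · have hz : (l+1).toNat = 0 := by omega
      simp [hz, pmatch]
      omega
    · have hre : r.toNat = nn := by omega
      rw [hre]
      simp [List.drop_of_length_le (show (cs.take nn).length ≤ nn by rw [List.length_take]; omega), pmatch_nil_right]
      omega

lemma check_eq_okSplit (cs : List Char) (nn : Nat) (hn : nn ≤ cs.length) (j : Nat) (hj : j + 1 ≤ nn) :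
    check cs (j : Int) (nn : Int) = okSplit (cs.take nn) j := by
  have h1 := checkLoop_spec cs nn hn (j : Int) ((j : Int) + 1) (by omega) (by omega) (by omega)
  have e0 : ((j : Int) + 1).toNat = j + 1 := by omega
  rw [e0] at h1
  unfold check okSplit
  rw [h1, ← prefix_or_eq_pmatch]

lemma foldl_filter_inter (ss : List (List Int)) (init : List Int) :
    ss.foldl (fun acc s => acc.filter (fun j => s.contains j)) init
      = init.filter (fun j => ss.all (fun s => s.contains j)) := by
  induction ss generalizing init with
  | nil => simp
  | cons s ss ih =>
    simp only [List.foldl_cons]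
    rw [ih, List.filter_filter]
    apply List.filter_congr
    intro x _
    simp only [List.all_cons]
    rw [Bool.and_comm]

lemma pyRange_sub_one (nn : Nat) :
    PySem.List.pyRange 0 ((nn : Int) - 1) 1 = (List.range (nn - 1)).map (fun k : Nat => (k : Int)) := by
  cases nn with
  | zero => rw [PySem.List.pyRange_one_eq_nil (by omega)]; rfl
  | succ k =>
    have : ((k + 1 : Nat) : Int) - 1 = (k : Int) := by omega
    rw [this, PySem.List.pyRange_zero_natCast]
    simp

lemma contains_filter_pyRange (nn jn : Nat) (h : jn < nn) (q : Int → Bool) :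
    ((PySem.List.pyRange 0 (nn : Int) 1).filter q).contains (jn : Int) = q (jn : Int) := by
  rw [PySem.List.pyRange_zero_natCast, List.filter_map]
  cases hq : q (jn : Int) with
  | true =>
    rw [List.contains_iff_mem.mpr]
    exact List.mem_map.mpr ⟨jn, List.mem_filter.mpr ⟨List.mem_range.mpr h, by simpa using hq⟩, rfl⟩
  | false =>
    rw [Bool.eq_false_iff]
    intro hc
    obtain ⟨k, hk, he⟩ := List.mem_map.mp (List.contains_iff_mem.mp hc)
    have : k = jn := by exact_mod_cast he
    subst this
    have := (List.mem_filter.mp hk).2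
    simp [hq] at this

lemma foldl_min_const (ls : List (List Char)) (nn : Nat) (h : ∀ x ∈ ls, nn ≤ x.length) :
    ls.foldl (fun a r => Nat.min a r.length) nn = nn := by
  induction ls with
  | nil => rfl
  | cons x xs ih =>
    simp only [List.foldl_cons]
    have e : nn.min x.length = nn := Nat.min_eq_left (h x List.mem_cons_self)
    rw [e]
    exact ih (fun y hy => h y (List.mem_cons_of_mem x hy))

lemma getD_take (x : List Char) (nn i : Nat) (hi : i < nn) :
    (x.take nn).getD i ' ' = x.getD i ' ' := by
  simp [List.getD, hi]

lemma all_congr' {α : Type} (l : List α) (p q : α → Bool) (h : ∀ x ∈ l, p x = q x) :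
    l.all p = l.all q := by
  induction l with
  | nil => rfl
  | cons x xs ih =>
    simp only [List.all_cons]
    rw [h x List.mem_cons_self, ih (fun y hy => h y (List.mem_cons_of_mem x hy))]

theorem solve_spec : Claim_equal_solve := by
  intro pattern _ hpre
  obtain ⟨hnil, hall⟩ := hpre
  show solve pattern = solve_alt pattern
  simp only [solve, solve_alt]
  set nn : Nat := (pattern.headD "").toList.length with hnn
  have hm1 : 1 ≤ pattern.length := by cases pattern with | nil => exact absurd rfl hnil | cons a l => simp
  -- the two column constructions agree, and both minimum folds evaluate to nn
  have hminA : (pattern.map String.toList).foldl (fun a r => Nat.min a r.length) nn = nn := by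
    apply foldl_min_const
    intro x hx
    obtain ⟨s, hs, rfl⟩ := List.mem_map.mp hx
    exact hall s hs
  have hminB : (pattern.map (fun s => s.toList.take nn)).foldl (fun a r => Nat.min a r.length) nn = nn := by
    apply foldl_min_const
    intro x hx
    obtain ⟨s, hs, rfl⟩ := List.mem_map.mp hx
    have := hall s hs
    rw [List.length_take]
    omega
  rw [foldl_filter_inter, foldl_filter_inter, hminA, hminB]
  have hT : (List.range nn).map (fun i => (pattern.map String.toList).map (fun row => row.getD i ' '))
      = (List.range nn).map (fun i => (pattern.map (fun s => s.toList.take nn)).map (fun r => r.getD i ' ')) := by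
    apply List.map_eq_map_iff.mpr
    intro i hi
    rw [List.map_map, List.map_map]
    apply List.map_eq_map_iff.mpr
    intro s _
    exact (getD_take s.toList nn i (List.mem_range.mp hi)).symm
  rw [Prod.mk.injEq]
  constructor
  · rw [pyRange_sub_one nn, List.filter_map]
    apply congrArg
    apply List.filter_congr
    intro jn hjn
    have hjn' : jn < nn - 1 := List.mem_range.mp hjn
    simp only [Function.comp_apply, List.all_map]
    apply all_congr'
    intro s hs
    simp only [Function.comp_apply]
    rw [contains_filter_pyRange nn jn (by omega)]
    exact check_eq_okSplit s.toList nn (hall s hs) jn (by omega)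
  · rw [hT, List.length_map, pyRange_sub_one pattern.length, List.filter_map]
    apply congrArg
    apply List.filter_congr
    intro jn hjn
    have hjn' : jn < pattern.length - 1 := List.mem_range.mp hjn
    simp only [Function.comp_apply, List.all_map]
    apply all_congr'
    intro i _
    simp only [Function.comp_apply]
    set col : List Char := (pattern.map (fun s => s.toList.take nn)).map (fun r => r.getD i ' ') with hcol
    have hlen : col.length = pattern.length := by
      rw [hcol, List.length_map, List.length_map]
    rw [contains_filter_pyRange pattern.length jn (by omega)]
    have hc := check_eq_okSplit col pattern.length (le_of_eq hlen.symm) jn (by omega)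
    rw [List.take_of_length_le (le_of_eq hlen)] at hc
    exact hc
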